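-- pv_equiv track=rewrite | github.com/burakalver/cgap_scratch | code/inh_mode/inheritance_mode.py | inheritance_modes_cmphet
-- ===== SOURCE A (Python) =====
-- def inheritance_modes_cmphet(cmphet):
--     '''
--     summarize Comphound Het Caller results
--     '''
--     inheritance_modes_set = set()
--     if cmphet is not None:
--         for icmphet in cmphet:
--             iphase = icmphet.get("comhet_phase")
--             iimpact = icmphet.get("comhet_impact_gene")
--             cmphet_str = "Compound Het (%s/%s)" % (iphase, iimpact.lower())
--             inheritance_modes_set.add(cmphet_str)
--     inheritance_modes = list(inheritance_modes_set)
--     inheritance_modes.sort() # to make results reproducible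
--     return inheritance_modes
-- ===== SOURCE B (Python) =====
-- def inheritance_modes_cmphet(cmphet):
--     '''
--     summarize Compound Het Caller results
--     '''
--     out = []
--     if cmphet is not None:
--         for icmphet in cmphet:
--             iphase = icmphet.get("comhet_phase")
--             iimpact = icmphet.get("comhet_impact_gene")
--             s = "Compound Het (%s/%s)" % (iphase, iimpact.lower())
--             i = 0
--             while i < len(out) and out[i] < s:
--                 i += 1
--             if i == len(out) or out[i] != s:
--                 out.insert(i, s)
--     return out
-- ===== Notes on version B (the rewrite author's own statement) =====
-- stated objective: alternative
-- what changed: B never sorts and never uses a set: it maintains the answer as a sorted duplicate-free list throughout, inserting each formatted string at its ordered position (skipping it if already present) in a single online pass.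
import Mathlib
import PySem

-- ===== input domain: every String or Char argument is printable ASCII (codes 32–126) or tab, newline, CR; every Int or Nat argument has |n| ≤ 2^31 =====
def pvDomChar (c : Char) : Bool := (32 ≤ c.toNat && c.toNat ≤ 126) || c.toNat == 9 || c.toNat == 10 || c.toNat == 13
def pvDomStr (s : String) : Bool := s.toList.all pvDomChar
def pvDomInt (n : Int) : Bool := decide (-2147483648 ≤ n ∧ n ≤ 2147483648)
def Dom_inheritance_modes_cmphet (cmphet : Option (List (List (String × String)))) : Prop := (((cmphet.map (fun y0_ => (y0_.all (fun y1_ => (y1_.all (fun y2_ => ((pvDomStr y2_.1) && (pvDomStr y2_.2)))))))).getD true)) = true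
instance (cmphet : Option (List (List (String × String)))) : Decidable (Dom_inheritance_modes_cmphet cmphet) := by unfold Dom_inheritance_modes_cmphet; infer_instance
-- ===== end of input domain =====

-- B replaces A's "hash set, then sort" by a single online pass that keeps the answer as a
-- sorted duplicate-free list, inserting each string at its ordered position (no sort, no set).

-- ===== PORT A =====
-- shared string formatting: "Compound Het (%s/%s)" % (iphase, iimpact.lower());
-- iphase = None renders as "None"; the total form .getD "" for iimpact is only reached
-- outside Pre_ (where the Python raises AttributeError).
def fmtCmphet (d : List (String × String)) : String :=
  let iphase := (PySem.Dict.mk d).get? "comhet_phase"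
  let iimpact := (PySem.Dict.mk d).get? "comhet_impact_gene"
  "Compound Het (" ++ iphase.getD "None" ++ "/" ++ PySem.Str.lower (iimpact.getD "") ++ ")"

def inheritance_modes_cmphet (cmphet : Option (List (List (String × String)))) : List String :=
  let s : PySem.Set String :=
    match cmphet with
    | none => PySem.Set.empty
    | some l => l.foldl (fun acc d => PySem.Set.add acc (fmtCmphet d)) PySem.Set.empty
  PySem.List.sorted s (fun x => x) false

-- ===== PORT B =====
-- the linear scan + conditional insert: 'while i < len(out) and out[i] < s: i += 1;
-- if i == len(out) or out[i] != s: out.insert(i, s)'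
def sortedInsert : List String → String → List String
  | [], s => [s]
  | x :: xs, s => if x < s then x :: sortedInsert xs s else if x = s then x :: xs else s :: x :: xs

def inheritance_modes_cmphet_alt (cmphet : Option (List (List (String × String)))) : List String :=
  match cmphet with
  | none => []
  | some l => l.foldl (fun out d => sortedInsert out (fmtCmphet d)) []

-- ===== PRECONDITION & SPEC =====
-- Pre_ excludes exactly the inputs where some entry lacks the "comhet_impact_gene" key:
-- there Python A raises AttributeError (None.lower()), so it returns on all of Pre_.
def Pre_inheritance_modes_cmphet (cmphet : Option (List (List (String × String)))) : Prop :=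
  (cmphet.getD []).all (fun d => d.any (fun p => p.1 == "comhet_impact_gene")) = true
instance (cmphet : Option (List (List (String × String)))) : Decidable (Pre_inheritance_modes_cmphet cmphet) := by unfold Pre_inheritance_modes_cmphet; infer_instance

def pvWitness_inheritance_modes_cmphet : (Option (List (List (String × String)))) :=
  some [[("comhet_phase", "Phased"), ("comhet_impact_gene", "GENE")], [("comhet_impact_gene", "x")]]

def Spec_inheritance_modes_cmphet (cmphet : Option (List (List (String × String)))) (out : List String) : Prop := out = inheritance_modes_cmphet_alt cmphet
instance (cmphet : Option (List (List (String × String)))) (out : List String) : Decidable (Spec_inheritance_modes_cmphet cmphet out) := by unfold Spec_inheritance_modes_cmphet; infer_instance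

-- ===== CLAIM (what is proved, stated in full; the proofs are below) =====
def Claim_equal_inheritance_modes_cmphet : Prop := ∀ (cmphet : Option (List (List (String × String)))), Dom_inheritance_modes_cmphet cmphet → Pre_inheritance_modes_cmphet cmphet → Spec_inheritance_modes_cmphet cmphet (inheritance_modes_cmphet cmphet)

-- ===== LEMMAS AND PROOFS =====

theorem mem_sortedInsert (a s : String) (l : List String) :
    a ∈ sortedInsert l s ↔ a ∈ l ∨ a = s := by
  induction l with
  | nil => simp [sortedInsert]
  | cons x xs ih =>
    simp only [sortedInsert]
    split_ifs with h1 h2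
    · simp only [List.mem_cons, ih]; tauto
    · subst h2; simp only [List.mem_cons]; tauto
    · simp only [List.mem_cons]; tauto

theorem pairwise_sortedInsert (s : String) (l : List String)
    (h : l.Pairwise (· < ·)) : (sortedInsert l s).Pairwise (· < ·) := by
  induction l with
  | nil => simp [sortedInsert]
  | cons x xs ih =>
    rcases List.pairwise_cons.mp h with ⟨hx, hxs⟩
    simp only [sortedInsert]
    split_ifs with h1 h2
    · refine List.pairwise_cons.mpr ⟨?_, ih hxs⟩
      intro a ha
      rcases (mem_sortedInsert a s xs).mp ha with h' | h'
      · exact hx a h'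
      · exact h' ▸ h1
    · exact h
    · have hsx : s < x := lt_of_le_of_ne (not_lt.mp h1) (Ne.symm h2)
      refine List.pairwise_cons.mpr ⟨?_, h⟩
      intro a ha
      rcases List.mem_cons.mp ha with h' | h'
      · exact h' ▸ hsx
      · exact lt_trans hsx (hx a h')

-- the fold invariant: the accumulator stays strictly sorted, and its members are
-- the initial members together with the inserted strings
theorem foldl_sortedInsert_pairwise (strs : List String) (acc : List String)
    (h : acc.Pairwise (· < ·)) :
    (strs.foldl sortedInsert acc).Pairwise (· < ·) := by
  induction strs generalizing acc with
  | nil => exact h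
  | cons s ss ih => exact ih _ (pairwise_sortedInsert s acc h)

theorem mem_foldl_sortedInsert (a : String) (strs : List String) (acc : List String) :
    a ∈ strs.foldl sortedInsert acc ↔ a ∈ acc ∨ a ∈ strs := by
  induction strs generalizing acc with
  | nil => simp
  | cons s ss ih =>
    simp only [List.foldl_cons, ih, mem_sortedInsert, List.mem_cons]
    tauto

-- core: sorting the set equals the online sorted-insert fold over the full list
theorem sorted_set_eq_foldl_insert (strs : List String) :
    PySem.List.sorted (PySem.Set.ofList strs) (fun x => x) false =
      strs.foldl sortedInsert [] := by
  have hlt : (strs.foldl sortedInsert []).Pairwise (· < ·) :=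
    foldl_sortedInsert_pairwise strs [] (by simp)
  have hnd : (strs.foldl sortedInsert []).Nodup := hlt.imp (fun h => ne_of_lt h)
  have hmem : ∀ a, a ∈ strs.foldl sortedInsert [] ↔ a ∈ PySem.Set.ofList strs := by
    intro a
    rw [mem_foldl_sortedInsert, PySem.Set.mem_ofList]
    simp
  have hperm : (strs.foldl sortedInsert []).Perm (PySem.Set.ofList strs) :=
    (List.perm_ext_iff_of_nodup hnd (PySem.Set.nodup_ofList strs)).mpr hmem
  exact PySem.List.sorted_eq_of_perm_of_pairwise_lt (PySem.Set.ofList strs) _ (fun x => x) hperm hlt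

-- ===== VERDICT (by name: the statement is the Claim_ definition above) =====
theorem inheritance_modes_cmphet_spec : Claim_equal_inheritance_modes_cmphet := by
  intro cmphet _ _
  unfold Spec_inheritance_modes_cmphet inheritance_modes_cmphet inheritance_modes_cmphet_alt
  cases cmphet with
  | none => rfl
  | some l =>
    simp only
    rw [show List.foldl (fun out d => sortedInsert out (fmtCmphet d)) [] l
          = (l.map fmtCmphet).foldl sortedInsert [] from (List.foldl_map ..).symm,
        ← sorted_set_eq_foldl_insert (l.map fmtCmphet)]
    congr 1
    rw [PySem.Set.ofList_eq_foldl, List.foldl_map]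
    rfl
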